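-- pv_equiv track=rewrite | github.com/atomwalk12/linalg-zero | linalg_zero/grpo/verifiers/xml_parser.py | is_last_msg_tool_call
-- ===== SOURCE A (Python) =====
-- def is_last_msg_tool_call(messages: list[dict]) -> bool:
--     prev_is_tool_response = False
--     for prev in reversed(messages):
--         if prev.get("role") == "system":
--             continue
--         if prev.get("role") == "tool":
--             prev_is_tool_response = True
--         break
--     return prev_is_tool_response
-- ===== SOURCE B (Python) =====
-- def is_last_msg_tool_call(messages: list[dict]) -> bool:
--     non_system = [m for m in messages if m.get("role") != "system"]
--     return bool(non_system) and non_system[-1].get("role") == "tool"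
-- ===== Notes on version B (the rewrite author's own statement) =====
-- stated objective: simpler
-- what changed: Replaces the reverse scan with break by a forward filter of non-system messages followed by a check of the filtered list's last element.
import Mathlib
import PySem

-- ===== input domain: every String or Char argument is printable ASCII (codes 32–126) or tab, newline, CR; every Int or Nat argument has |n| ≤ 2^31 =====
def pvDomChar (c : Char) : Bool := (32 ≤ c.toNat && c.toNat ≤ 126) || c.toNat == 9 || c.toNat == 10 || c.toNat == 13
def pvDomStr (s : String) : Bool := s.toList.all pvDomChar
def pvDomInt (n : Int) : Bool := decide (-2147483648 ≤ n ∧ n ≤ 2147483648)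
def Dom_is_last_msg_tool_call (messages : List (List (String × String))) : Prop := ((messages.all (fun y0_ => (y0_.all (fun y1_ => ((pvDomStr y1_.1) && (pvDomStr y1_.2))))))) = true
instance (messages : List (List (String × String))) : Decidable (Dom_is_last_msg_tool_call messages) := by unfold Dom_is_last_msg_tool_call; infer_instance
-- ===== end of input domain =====

-- B replaces A's reverse scan by a forward filter of non-system messages plus a last-element check (simpler decomposition).


-- ===== PORT A =====
-- m.get("role"): first-match association-list lookup (Python dict semantics)
def pvGetRole (m : List (String × String)) : Option String :=
  (PySem.Dict.mk m).get? "role"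

-- reverse for-loop with continue/break, carrying prev_is_tool_response
def pvScanA : List (List (String × String)) → Bool
  | [] => false
  | prev :: rest =>
    if pvGetRole prev = some "system" then pvScanA rest
    else decide (pvGetRole prev = some "tool")

def is_last_msg_tool_call (messages : List (List (String × String))) : Bool :=
  pvScanA messages.reverse

-- ===== PORT B =====
def is_last_msg_tool_call_alt (messages : List (List (String × String))) : Bool :=
  let non_system := messages.filter (fun m => decide (pvGetRole m ≠ some "system"))
  match non_system.getLast? with
  | none => false
  | some m => decide (pvGetRole m = some "tool")

-- ===== PRECONDITION & SPEC =====
def Spec_is_last_msg_tool_call (messages : List (List (String × String))) (out : Bool) : Prop := out = is_last_msg_tool_call_alt messages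
instance (messages : List (List (String × String))) (out : Bool) : Decidable (Spec_is_last_msg_tool_call messages out) := by unfold Spec_is_last_msg_tool_call; infer_instance

-- ===== CLAIM (what is proved, stated in full; the proofs are below) =====
def Claim_equal_is_last_msg_tool_call : Prop := ∀ (messages : List (List (String × String))), Dom_is_last_msg_tool_call messages → Spec_is_last_msg_tool_call messages (is_last_msg_tool_call messages)

-- ===== LEMMAS AND PROOFS =====
lemma pvScanA_eq (l : List (List (String × String))) :
    pvScanA l = (match (l.filter (fun m => decide (pvGetRole m ≠ some "system"))).head? with
      | none => false
      | some m => decide (pvGetRole m = some "tool")) := by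
  induction l with
  | nil => rfl
  | cons h t ih =>
    by_cases hs : pvGetRole h = some "system" <;>
      simp [pvScanA, List.filter, hs, ih]

-- ===== VERDICT (by name: the statement is the Claim_ definition above) =====
theorem is_last_msg_tool_call_spec : Claim_equal_is_last_msg_tool_call := by
  intro messages _
  unfold Spec_is_last_msg_tool_call is_last_msg_tool_call is_last_msg_tool_call_alt
  rw [pvScanA_eq, List.filter_reverse, List.head?_reverse]
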